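-- pv_equiv track=rewrite | github.com/RoyelBee/31BranchOutstanding | Functions/email_finder.py | find_to_email
-- ===== SOURCE A (Python) =====
-- kamrul_branch = ['JESSKF', 'MIRSKF', 'KHLSKF', 'COMSKF', 'PATSKF', 'BSLSKF']
--
-- anwar_branch = ['MYMSKF', 'FRDSKF', 'TGLSKF', 'RAJSKF', 'SAVSK', 'BOGSKF']
--
-- atik_branch = ['HZJSKF', 'RNGSKF', 'KSGSKF', 'MOTSKF', 'DNJSKF', 'GZPSKF', 'KRNSKF']
--
-- nurul_branch = ['VRBSKF', 'NOKSKF', 'SYLSKF', 'MHKSKF', 'MLVSKF', 'FENSKF']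
--
-- hafizur_branch = ['NAJSKF', 'CTGSKF', 'CTNSKF', 'KUSSKF', 'PBNSKF', 'COXSKF']
--
-- def find_to_email(branch_name):
--     branch = branch_name
--     for i in range(len(kamrul_branch)):
--         if kamrul_branch[i]== branch:
--             to = 'rejaul.islam@transcombd.com'
--             return to
--
--     for i in range(len(anwar_branch)):
--         if anwar_branch[i]== branch:
--             to = 'anwar_branch@transcombd.com'
--             return to
--
--     for i in range(len(atik_branch)):
--         if atik_branch[i]== branch:
--             to = 'atik_branch@transcombd.com'
--             return to
--
--     for i in range(len(nurul_branch)):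
--         if nurul_branch[i]== branch:
--             to = 'nurul_branch@transcombd.com'
--             return to
--
--     for i in range(len(hafizur_branch)):
--         if hafizur_branch[i]== branch:
--             to = 'hafizur_branch@transcombd.com'
--             return to
-- ===== SOURCE B (Python) =====
-- kamrul_branch = ['JESSKF', 'MIRSKF', 'KHLSKF', 'COMSKF', 'PATSKF', 'BSLSKF']
-- anwar_branch = ['MYMSKF', 'FRDSKF', 'TGLSKF', 'RAJSKF', 'SAVSK', 'BOGSKF']
-- atik_branch = ['HZJSKF', 'RNGSKF', 'KSGSKF', 'MOTSKF', 'DNJSKF', 'GZPSKF', 'KRNSKF']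
-- nurul_branch = ['VRBSKF', 'NOKSKF', 'SYLSKF', 'MHKSKF', 'MLVSKF', 'FENSKF']
-- hafizur_branch = ['NAJSKF', 'CTGSKF', 'CTNSKF', 'KUSSKF', 'PBNSKF', 'COXSKF']
--
-- _PRIORITY = [
--     (kamrul_branch, 'rejaul.islam@transcombd.com'),
--     (anwar_branch, 'anwar_branch@transcombd.com'),
--     (atik_branch, 'atik_branch@transcombd.com'),
--     (nurul_branch, 'nurul_branch@transcombd.com'),
--     (hafizur_branch, 'hafizur_branch@transcombd.com'),
-- ]
--
-- # Built once: branch code -> email (codes are pairwise distinct across the lists).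
-- _EMAIL_MAP = {code: email for codes, email in _PRIORITY for code in codes}
--
-- def find_to_email(branch_name):
--     return _EMAIL_MAP.get(branch_name)
-- ===== Notes on version B (the rewrite author's own statement) =====
-- stated objective: idiomatic
-- what changed: Replaces five sequential linear list scans with a single branch-code-to-email dict built once at module load and one dict lookup (get returns None on a miss, matching A's fall-through).
import Mathlib
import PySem

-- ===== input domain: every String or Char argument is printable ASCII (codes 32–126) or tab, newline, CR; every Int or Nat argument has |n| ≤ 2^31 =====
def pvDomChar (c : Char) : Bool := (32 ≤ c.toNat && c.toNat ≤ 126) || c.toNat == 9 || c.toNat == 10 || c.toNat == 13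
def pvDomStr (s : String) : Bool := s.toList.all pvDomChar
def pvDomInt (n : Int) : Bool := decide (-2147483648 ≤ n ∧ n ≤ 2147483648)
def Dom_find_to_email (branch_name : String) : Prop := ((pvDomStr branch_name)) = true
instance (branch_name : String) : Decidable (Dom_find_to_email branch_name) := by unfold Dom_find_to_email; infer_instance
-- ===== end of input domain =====

-- B replaces A's five sequential linear scans with one association map
-- (branch code -> email) built once and a single lookup (idiomatic).

-- ===== PORT A =====
def kamrul_branch : List String := ["JESSKF", "MIRSKF", "KHLSKF", "COMSKF", "PATSKF", "BSLSKF"]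
def anwar_branch : List String := ["MYMSKF", "FRDSKF", "TGLSKF", "RAJSKF", "SAVSK", "BOGSKF"]
def atik_branch : List String := ["HZJSKF", "RNGSKF", "KSGSKF", "MOTSKF", "DNJSKF", "GZPSKF", "KRNSKF"]
def nurul_branch : List String := ["VRBSKF", "NOKSKF", "SYLSKF", "MHKSKF", "MLVSKF", "FENSKF"]
def hafizur_branch : List String := ["NAJSKF", "CTGSKF", "CTNSKF", "KUSSKF", "PBNSKF", "COXSKF"]

-- one 'for i in range(len(l)): if l[i] == branch: return to' loop
def scanBranch (codes : List String) (to_ : String) (branch : String) : Option String :=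
  match codes with
  | [] => none
  | c :: rest => if c == branch then some to_ else scanBranch rest to_ branch

def find_to_email (branch_name : String) : Option String :=
  let branch := branch_name
  match scanBranch kamrul_branch "rejaul.islam@transcombd.com" branch with
  | some t => some t
  | none =>
  match scanBranch anwar_branch "anwar_branch@transcombd.com" branch with
  | some t => some t
  | none =>
  match scanBranch atik_branch "atik_branch@transcombd.com" branch with
  | some t => some t
  | none =>
  match scanBranch nurul_branch "nurul_branch@transcombd.com" branch with
  | some t => some t
  | none =>
  match scanBranch hafizur_branch "hafizur_branch@transcombd.com" branch with
  | some t => some t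
  | none => none

-- ===== PORT B =====
def priorityList : List (List String × String) :=
  [(kamrul_branch, "rejaul.islam@transcombd.com"),
   (anwar_branch, "anwar_branch@transcombd.com"),
   (atik_branch, "atik_branch@transcombd.com"),
   (nurul_branch, "nurul_branch@transcombd.com"),
   (hafizur_branch, "hafizur_branch@transcombd.com")]

-- the dict comprehension {code: email for codes, email in _PRIORITY for code in codes}
def emailMap : PySem.Dict String String :=
  PySem.Dict.ofList (priorityList.flatMap (fun p => p.1.map (fun c => (c, p.2))))

def find_to_email_alt (branch_name : String) : Option String :=
  emailMap.get? branch_name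

-- ===== PRECONDITION & SPEC =====
def Spec_find_to_email (branch_name : String) (out : Option String) : Prop := out = find_to_email_alt branch_name
instance (branch_name : String) (out : Option String) : Decidable (Spec_find_to_email branch_name out) := by unfold Spec_find_to_email; infer_instance

-- ===== CLAIM (what is proved, stated in full; the proofs are below) =====
def Claim_equal_find_to_email : Prop := ∀ (branch_name : String), Dom_find_to_email branch_name → Spec_find_to_email branch_name (find_to_email branch_name)

-- ===== LEMMAS AND PROOFS =====
-- emailMap as a literal association list (all keys distinct, so ofList is just the list)
set_option maxHeartbeats 2000000 in
lemma emailMap_eq : emailMap = PySem.Dict.mk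
    [("JESSKF", "rejaul.islam@transcombd.com"), ("MIRSKF", "rejaul.islam@transcombd.com"),
     ("KHLSKF", "rejaul.islam@transcombd.com"), ("COMSKF", "rejaul.islam@transcombd.com"),
     ("PATSKF", "rejaul.islam@transcombd.com"), ("BSLSKF", "rejaul.islam@transcombd.com"),
     ("MYMSKF", "anwar_branch@transcombd.com"), ("FRDSKF", "anwar_branch@transcombd.com"),
     ("TGLSKF", "anwar_branch@transcombd.com"), ("RAJSKF", "anwar_branch@transcombd.com"),
     ("SAVSK", "anwar_branch@transcombd.com"), ("BOGSKF", "anwar_branch@transcombd.com"),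
     ("HZJSKF", "atik_branch@transcombd.com"), ("RNGSKF", "atik_branch@transcombd.com"),
     ("KSGSKF", "atik_branch@transcombd.com"), ("MOTSKF", "atik_branch@transcombd.com"),
     ("DNJSKF", "atik_branch@transcombd.com"), ("GZPSKF", "atik_branch@transcombd.com"),
     ("KRNSKF", "atik_branch@transcombd.com"),
     ("VRBSKF", "nurul_branch@transcombd.com"), ("NOKSKF", "nurul_branch@transcombd.com"),
     ("SYLSKF", "nurul_branch@transcombd.com"), ("MHKSKF", "nurul_branch@transcombd.com"),
     ("MLVSKF", "nurul_branch@transcombd.com"), ("FENSKF", "nurul_branch@transcombd.com"),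
     ("NAJSKF", "hafizur_branch@transcombd.com"), ("CTGSKF", "hafizur_branch@transcombd.com"),
     ("CTNSKF", "hafizur_branch@transcombd.com"), ("KUSSKF", "hafizur_branch@transcombd.com"),
     ("PBNSKF", "hafizur_branch@transcombd.com"), ("COXSKF", "hafizur_branch@transcombd.com")] := by
  rfl

-- scan loop = first-match lookup in the corresponding assoc list
lemma scan_eq_get (codes : List String) (e b : String) :
    scanBranch codes e b = (PySem.Dict.mk (codes.map (fun c => (c, e)))).get? b := by
  induction codes with
  | nil => rfl
  | cons c rest ih =>
    simp only [scanBranch, List.map, PySem.Dict.get?_mk_cons, ih]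

-- fall-through chaining = lookup in the concatenation
lemma get?_mk_append (l1 l2 : List (String × String)) (b : String) :
    (PySem.Dict.mk (l1 ++ l2)).get? b =
      (match (PySem.Dict.mk l1).get? b with
       | some t => some t
       | none => (PySem.Dict.mk l2).get? b) := by
  induction l1 with
  | nil => rfl
  | cons p rest ih =>
    obtain ⟨k, v⟩ := p
    simp only [List.cons_append, PySem.Dict.get?_mk_cons, ih]
    by_cases h : (k == b) = true <;> simp [h]

-- ===== VERDICT (by name: the statement is the Claim_ definition above) =====
theorem find_to_email_spec : Claim_equal_find_to_email := by
  intro b _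
  unfold Spec_find_to_email
  simp only [find_to_email, find_to_email_alt]
  rw [emailMap_eq]
  rw [scan_eq_get kamrul_branch, scan_eq_get anwar_branch, scan_eq_get atik_branch,
      scan_eq_get nurul_branch, scan_eq_get hafizur_branch]
  have hlast : ∀ o : Option String,
      (match o with | some t => some t | none => none) = o := by
    intro o; cases o <;> rfl
  rw [hlast, ← get?_mk_append, ← get?_mk_append, ← get?_mk_append, ← get?_mk_append]
  rfl
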